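-- pv_equiv track=rewrite | github.com/kdk0411/Coding_Test_Study | Programmers/Lv.01/모의고사.py | solution
-- ===== SOURCE A (Python) =====
-- def solution(answers):
--     arr1 = [1, 2, 3, 4, 5]
--     arr2 = [2, 1, 2, 3, 2, 4, 2, 5]
--     arr3 = [3, 3, 1, 1, 2, 2, 4, 4, 5, 5]
--     score = [0, 0, 0]
--     ret = []
--     for i in range(len(answers)):
--         # i%len(arr1) -> 각 리스트의 길이만큼 나누어서 계산하는 방법
--         if (arr1[i % len(arr1)] == answers[i]):
--             score[0] += 1
--         if (arr2[i % len(arr2)] == answers[i]):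
--             score[1] += 1
--         if (arr3[i % len(arr3)] == answers[i]):
--             score[2] += 1
--
--     for i in range(len(score)):
--         if (score[i] == max(score)):
--             ret.append(i + 1)
--     return ret
-- ===== SOURCE B (Python) =====
-- def solution(answers):
--     # Residue-class histogram: one pass buckets answers by (index mod 40, value)
--     # (40 = lcm of the three pattern periods); each taker's score is then 40
--     # table lookups, independent of the answers themselves.
--     keyed = [(i % 40, a) for i, a in enumerate(answers)]
--     cnt = {}
--     for k in keyed:
--         cnt[k] = cnt.get(k, 0) + 1
--     patterns = [[1, 2, 3, 4, 5],
--                 [2, 1, 2, 3, 2, 4, 2, 5],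
--                 [3, 3, 1, 1, 2, 2, 4, 4, 5, 5]]
--     scores = [sum(cnt.get((r, pat[r % len(pat)]), 0) for r in range(40))
--               for pat in patterns]
--     best = max(scores)
--     return [i + 1 for i, s in enumerate(scores) if s == best]
-- ===== Notes on version B (the rewrite author's own statement) =====
-- stated objective: alternative
-- what changed: A compares every answer against all three patterns in one interleaved indexed loop with three mutable counters; B instead makes a single pass that buckets answers into a histogram keyed by (index mod 40, value) (40 = lcm of the pattern periods) and then computes each taker's score as 40 table lookups, independent of the answers list.
import Mathlib
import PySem

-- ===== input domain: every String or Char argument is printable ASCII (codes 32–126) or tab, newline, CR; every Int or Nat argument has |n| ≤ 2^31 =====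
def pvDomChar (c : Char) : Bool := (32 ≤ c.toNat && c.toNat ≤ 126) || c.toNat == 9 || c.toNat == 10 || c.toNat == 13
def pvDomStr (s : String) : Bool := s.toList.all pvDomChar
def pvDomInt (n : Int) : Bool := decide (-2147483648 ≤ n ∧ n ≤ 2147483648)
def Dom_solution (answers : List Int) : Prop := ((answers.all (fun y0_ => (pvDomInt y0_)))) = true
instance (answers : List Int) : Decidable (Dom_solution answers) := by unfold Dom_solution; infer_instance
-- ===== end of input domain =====

-- B replaces A's interleaved per-index pattern comparisons by a one-pass residue-class
-- histogram keyed by (index mod 40, answer); each score is then 40 table lookups (alternative decomposition).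


-- ===== PORT A =====
def solA_arr1 : List Int := [1, 2, 3, 4, 5]
def solA_arr2 : List Int := [2, 1, 2, 3, 2, 4, 2, 5]
def solA_arr3 : List Int := [3, 3, 1, 1, 2, 2, 4, 4, 5, 5]

-- the single interleaved 'for i in range(len(answers))' loop, carrying the score triple;
-- arrK[i % len(arrK)] is always in range, so getD is exact
def solA_loop : List Int → Nat → Int × Int × Int → Int × Int × Int
  | [], _, s => s
  | a :: rest, i, (s1, s2, s3) =>
      solA_loop rest (i + 1)
        ((if solA_arr1.getD (i % 5) 0 = a then s1 + 1 else s1),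
         (if solA_arr2.getD (i % 8) 0 = a then s2 + 1 else s2),
         (if solA_arr3.getD (i % 10) 0 = a then s3 + 1 else s3))

def solution (answers : List Int) : List Int :=
  let s := solA_loop answers 0 (0, 0, 0)
  -- second loop: for i in range(3): if score[i] == max(score): ret.append(i+1)
  let m := max s.1 (max s.2.1 s.2.2)
  ((if s.1 = m then [(1 : Int)] else []) ++
   (if s.2.1 = m then [(2 : Int)] else []) ++
   (if s.2.2 = m then [(3 : Int)] else []))

-- ===== PORT B =====
def solB_patterns : List (List Int) :=
  [[1, 2, 3, 4, 5], [2, 1, 2, 3, 2, 4, 2, 5], [3, 3, 1, 1, 2, 2, 4, 4, 5, 5]]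

-- keyed = [(i % 40, a) for i, a in enumerate(answers)]
def solB_keyed (answers : List Int) : List (Int × Int) :=
  (PySem.List.enumerate answers).map (fun ia => (PySem.Int.mod ia.1 40, ia.2))

-- for k in keyed: cnt[k] = cnt.get(k, 0) + 1
def solB_cnt (answers : List Int) : PySem.Dict (Int × Int) Int :=
  (solB_keyed answers).foldl (fun d k => d.modify k 0 (· + 1)) PySem.Dict.empty

-- scores = [sum(cnt.get((r, pat[r % len(pat)]), 0) for r in range(40)) for pat in patterns]
def solB_scores (answers : List Int) : List Int :=
  solB_patterns.map (fun pat =>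
    ((PySem.List.pyRange 0 40 1).map
      (fun r => (solB_cnt answers).getD (r, pat.getD (r.toNat % pat.length) 0) 0)).sum)

def solution_alt (answers : List Int) : List Int :=
  let scores := solB_scores answers
  -- best = max(scores)
  let best := (PySem.List.max? scores (fun x => x)).getD 0
  -- [i + 1 for i, s in enumerate(scores) if s == best]
  (PySem.List.enumerate scores).foldl
    (fun ret is => if is.2 = best then ret ++ [is.1 + 1] else ret) []

-- ===== PRECONDITION & SPEC =====
def Spec_solution (answers : List Int) (out : List Int) : Prop := out = solution_alt answers
instance (answers : List Int) (out : List Int) : Decidable (Spec_solution answers out) := by unfold Spec_solution; infer_instance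

-- ===== CLAIM (what is proved, stated in full; the proofs are below) =====
def Claim_equal_solution : Prop := ∀ (answers : List Int), Dom_solution answers → Spec_solution answers (solution answers)

-- ===== LEMMAS AND PROOFS =====

-- count of matches of pat (cycled) against answers, indices starting at i
def cntFrom (pat : List Int) : List Int → Nat → Int
  | [], _ => 0
  | a :: rest, i =>
      (if pat.getD (i % pat.length) 0 = a then 1 else 0) + cntFrom pat rest (i + 1)

theorem solA_loop_eq (ans : List Int) : ∀ (i : Nat) (s1 s2 s3 : Int),
    solA_loop ans i (s1, s2, s3) =
      (s1 + cntFrom solA_arr1 ans i, s2 + cntFrom solA_arr2 ans i, s3 + cntFrom solA_arr3 ans i) := by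
  induction ans with
  | nil => intro i s1 s2 s3; simp [solA_loop, cntFrom]
  | cons a rest ih =>
      intro i s1 s2 s3
      simp only [solA_loop, cntFrom, ih]
      have h1 : solA_arr1.length = 5 := rfl
      have h2 : solA_arr2.length = 8 := rfl
      have h3 : solA_arr3.length = 10 := rfl
      rw [h1, h2, h3]
      split_ifs <;> (simp only [Prod.mk.injEq]; refine ⟨by omega, by omega, by omega⟩)

-- Σ over a Nodup list of a point indicator on pairs (r, f r)
theorem sum_map_indicator (f : Int → Int) (m a : Int) :
    ∀ rs : List Int, rs.Nodup →
      ((rs.map (fun r => if ((m, a) : Int × Int) = (r, f r) then (1 : Int) else 0)).sum)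
        = if m ∈ rs ∧ f m = a then 1 else 0 := by
  intro rs
  induction rs with
  | nil => intro _; simp
  | cons r rest ih =>
      intro hnd
      rcases List.nodup_cons.mp hnd with ⟨hm, hrest⟩
      rw [List.map_cons, List.sum_cons, ih hrest]
      by_cases hmr : m = r
      · subst hmr
        have hnot : ¬(m ∈ rest ∧ f m = a) := fun h => hm h.1
        rw [if_neg hnot]
        by_cases hfa : f m = a
        · rw [if_pos (by rw [hfa]), if_pos ⟨List.mem_cons_self, hfa⟩]
          norm_num
        · rw [if_neg (by simp only [Prod.mk.injEq, true_and]; intro h; exact absurd h.symm hfa),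
              if_neg (by simp [hfa])]
          norm_num
      · rw [if_neg (by simp [Prod.ext_iff, hmr])]
        simp only [List.mem_cons, hmr, false_or]
        norm_num

def keyedFrom (ans : List Int) (j : Nat) : List (Int × Int) :=
  (PySem.List.enumerate ans (j : Int)).map (fun ia => (PySem.Int.mod ia.1 40, ia.2))

theorem keyedFrom_cons (a : Int) (rest : List Int) (j : Nat) :
    keyedFrom (a :: rest) j = (((j % 40 : Nat) : Int), a) :: keyedFrom rest (j + 1) := by
  unfold keyedFrom
  rw [PySem.List.enumerate_cons]
  simp only [List.map_cons]
  have h1 : PySem.Int.mod (j : Int) 40 = ((j % 40 : Nat) : Int) := by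
    exact_mod_cast PySem.Int.mod_natCast j 40
  have h2 : ((j : Int) + 1) = ((j + 1 : Nat) : Int) := by push_cast; ring
  rw [h1, h2]

-- the histogram sum over one residue period equals the direct cyclic match count
theorem sum_count_eq_cntFrom (pat : List Int) (hd : pat.length ∣ 40) :
    ∀ (ans : List Int) (j : Nat),
      (((PySem.List.pyRange 0 40 1).map
          (fun r => ((keyedFrom ans j).count (r, pat.getD (r.toNat % pat.length) 0) : Int))).sum)
        = cntFrom pat ans j := by
  intro ans
  induction ans with
  | nil =>
      intro j
      simp [keyedFrom, PySem.List.enumerate_nil, cntFrom]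
  | cons a rest ih =>
      intro j
      rw [keyedFrom_cons]
      have hcount : ∀ r : Int,
          (((((j % 40 : Nat) : Int), a) :: keyedFrom rest (j + 1)).count
              (r, pat.getD (r.toNat % pat.length) 0) : Int)
            = (if (((j % 40 : Nat) : Int), a) = (r, pat.getD (r.toNat % pat.length) 0) then (1 : Int) else 0)
              + ((keyedFrom rest (j + 1)).count (r, pat.getD (r.toNat % pat.length) 0) : Int) := by
        intro r
        simp [List.count_cons]
        ring
      calc ((PySem.List.pyRange 0 40 1).map
              (fun r => (((((j % 40 : Nat) : Int), a) :: keyedFrom rest (j + 1)).count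
                (r, pat.getD (r.toNat % pat.length) 0) : Int))).sum
          = ((PySem.List.pyRange 0 40 1).map
              (fun r => (if (((j % 40 : Nat) : Int), a) = (r, pat.getD (r.toNat % pat.length) 0) then (1 : Int) else 0)
                + ((keyedFrom rest (j + 1)).count (r, pat.getD (r.toNat % pat.length) 0) : Int))).sum := by
            exact congrArg List.sum (List.map_congr_left (fun r _ => hcount r))
        _ = ((PySem.List.pyRange 0 40 1).map
              (fun r => (if (((j % 40 : Nat) : Int), a) = (r, pat.getD (r.toNat % pat.length) 0) then (1 : Int) else 0))).sum
            + ((PySem.List.pyRange 0 40 1).map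
              (fun r => ((keyedFrom rest (j + 1)).count (r, pat.getD (r.toNat % pat.length) 0) : Int))).sum := by
            exact PySem.List.sum_map_add_int _ _ _
        _ = (if pat.getD (j % pat.length) 0 = a then (1 : Int) else 0) + cntFrom pat rest (j + 1) := by
            rw [ih (j + 1)]
            congr 1
            rw [sum_map_indicator (fun r => pat.getD (r.toNat % pat.length) 0)
                  (((j % 40 : Nat) : Int)) a _ (PySem.List.nodup_pyRange_one 0 40)]
            have hmem : (((j % 40 : Nat) : Int)) ∈ PySem.List.pyRange 0 40 1 := by
              rw [PySem.List.mem_pyRange_one]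
              constructor
              · positivity
              · exact_mod_cast Nat.mod_lt j (by norm_num)
            have hidx : (((j % 40 : Nat) : Int)).toNat % pat.length = j % pat.length := by
              rw [Int.toNat_natCast]
              exact Nat.mod_mod_of_dvd j hd
            have hb1 : (0 : Int) ≤ (j : Int) % 40 := Int.emod_nonneg _ (by norm_num)
            have hb2 : ((j : Int)) % 40 < 40 := Int.emod_lt_of_pos _ (by norm_num)
            simp only [hidx]
            by_cases hfa : pat.getD (j % pat.length) 0 = a
            · simp [hb1, hb2]
            · simp [hb1, hb2]
        _ = cntFrom pat (a :: rest) j := by rw [cntFrom]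

-- the B-side histogram lookup is a count over the keyed list
theorem getD_cnt_eq_count (keyed : List (Int × Int)) (k : Int × Int) :
    (keyed.foldl (fun d p => d.modify p 0 (· + 1)) PySem.Dict.empty).getD k 0
      = (keyed.count k : Int) := by
  rw [PySem.Dict.getD_foldl_modify_add_one]
  simp [PySem.Dict.getD_empty]

-- the two selection tails agree for any concrete score triple
set_option maxRecDepth 8192 in
theorem select_eq (c1 c2 c3 : Int) :
    ((if c1 = max c1 (max c2 c3) then [(1 : Int)] else []) ++
     (if c2 = max c1 (max c2 c3) then [(2 : Int)] else []) ++
     (if c3 = max c1 (max c2 c3) then [(3 : Int)] else []))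
    = (PySem.List.enumerate [c1, c2, c3]).foldl
        (fun ret is => if is.2 = (PySem.List.max? [c1, c2, c3] (fun x => x)).getD 0 then ret ++ [is.1 + 1] else ret) [] := by
  have hmax : (PySem.List.max? [c1, c2, c3] (fun x => x)).getD 0 = max c1 (max c2 c3) := by
    simp [PySem.List.max?, List.foldl, max_def]
    split_ifs <;> simp_all <;> split_ifs <;> simp_all <;> omega
  have henum : PySem.List.enumerate [c1, c2, c3] = [(0, c1), (1, c2), (2, c3)] := by
    simp [PySem.List.enumerate_cons, PySem.List.enumerate_nil]
  rw [hmax, henum]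
  clear hmax henum
  simp only [List.foldl]
  norm_num
  split_ifs <;> simp

theorem solB_keyed_eq (answers : List Int) : solB_keyed answers = keyedFrom answers 0 := by
  unfold solB_keyed keyedFrom
  norm_num

theorem solB_scores_eq (answers : List Int) :
    solB_scores answers = [cntFrom solA_arr1 answers 0, cntFrom solA_arr2 answers 0, cntFrom solA_arr3 answers 0] := by
  have hscore : ∀ pat : List Int, pat.length ∣ 40 →
      ((PySem.List.pyRange 0 40 1).map
        (fun r => (solB_cnt answers).getD (r, pat.getD (r.toNat % pat.length) 0) 0)).sum
        = cntFrom pat answers 0 := by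
    intro pat hd
    rw [← sum_count_eq_cntFrom pat hd answers 0]
    refine congrArg List.sum (List.map_congr_left (fun r _ => ?_))
    rw [solB_cnt, solB_keyed_eq, getD_cnt_eq_count]
  unfold solB_scores
  simp only [solB_patterns, List.map_cons, List.map_nil]
  rw [show ([1, 2, 3, 4, 5] : List Int) = solA_arr1 from rfl,
      show ([2, 1, 2, 3, 2, 4, 2, 5] : List Int) = solA_arr2 from rfl,
      show ([3, 3, 1, 1, 2, 2, 4, 4, 5, 5] : List Int) = solA_arr3 from rfl,
      hscore solA_arr1 (by decide), hscore solA_arr2 (by decide), hscore solA_arr3 (by decide)]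

-- ===== VERDICT =====
theorem solution_spec : Claim_equal_solution := by
  intro answers _
  unfold Spec_solution solution solution_alt
  have hA := solA_loop_eq answers 0 0 0 0
  simp only [zero_add] at hA
  rw [hA, solB_scores_eq]
  exact select_eq _ _ _
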